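-- pv_equiv track=rewrite | github.com/CanineSatsuma6/AdventOfCode | Python/2023/10/2.py | clearGrid
-- ===== SOURCE A (Python) =====
-- def clearGrid(grid, loop):
--
--     # Make loop a set so it's faster to search for elements in for large loops
--     loop = set(loop)
--
--     cleared = [list(row[:]) for row in grid]
--
--     for i, row in enumerate(cleared):
--         for j, _ in enumerate(row):
--             if (i, j) not in loop:
--                 cleared[i][j] = '.'
--
--     return [''.join(l for l in row) for row in cleared]
-- ===== SOURCE B (Python) =====
-- def clearGrid(grid, loop):
--     cleared = [['.'] * len(row) for row in grid]
--     for i, j in loop: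
--         if 0 <= i < len(cleared) and 0 <= j < len(cleared[i]):
--             cleared[i][j] = grid[i][j]
--     return [''.join(row) for row in cleared]
-- ===== Notes on version B (the rewrite author's own statement) =====
-- stated objective: simpler
-- what changed: Inverts the traversal: instead of scanning every cell and testing membership in the loop set, B starts from an all-dots grid and scatters only the in-bounds loop cells back in, copying each preserved character from the source grid.
import Mathlib
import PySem

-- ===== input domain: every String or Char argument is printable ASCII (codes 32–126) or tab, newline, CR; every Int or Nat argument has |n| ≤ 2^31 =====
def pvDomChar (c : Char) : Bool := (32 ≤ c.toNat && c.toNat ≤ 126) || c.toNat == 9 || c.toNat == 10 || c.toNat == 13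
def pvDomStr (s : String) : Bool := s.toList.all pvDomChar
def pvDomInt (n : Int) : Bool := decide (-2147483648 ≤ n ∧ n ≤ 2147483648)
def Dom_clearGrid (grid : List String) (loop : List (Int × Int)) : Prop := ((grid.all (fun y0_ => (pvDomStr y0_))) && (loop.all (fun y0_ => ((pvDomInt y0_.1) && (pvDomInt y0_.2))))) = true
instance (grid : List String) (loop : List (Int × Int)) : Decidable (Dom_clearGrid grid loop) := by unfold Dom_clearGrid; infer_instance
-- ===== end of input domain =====

-- B inverts the traversal: it starts from an all-dots grid and writes back only the loop
-- cells (with an in-bounds check), instead of scanning every cell and testing set membership.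

-- ===== PORT A =====
def clearGrid (grid : List String) (loop : List (Int × Int)) : List String :=
  let loopSet := PySem.Set.ofList loop
  let cleared := grid.map (fun row => row.toList)
  let cleared := (PySem.List.enumerate cleared).map (fun p =>
    (PySem.List.enumerate p.2).map (fun q =>
      if (p.1, q.1) ∉ loopSet then '.' else q.2))
  cleared.map (fun row => String.mk row)

-- ===== PORT B =====
-- one iteration of Source B's scatter loop: write grid[i][j] back if (i, j) is in bounds
def scatterStep (grid : List String) (cl : List (List Char)) (p : Int × Int) : List (List Char) :=
  if 0 ≤ p.1 ∧ p.1 < (cl.length : Int) ∧ 0 ≤ p.2 ∧ p.2 < ((cl.getD p.1.toNat []).length : Int) then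
    cl.modify p.1.toNat (fun row => row.set p.2.toNat ((grid.getD p.1.toNat "").toList.getD p.2.toNat '.'))
  else cl

def clearGrid_alt (grid : List String) (loop : List (Int × Int)) : List String :=
  let cleared := grid.map (fun row => List.replicate row.toList.length '.')
  let cleared := loop.foldl (scatterStep grid) cleared
  cleared.map (fun row => String.mk row)

-- ===== PRECONDITION & SPEC =====
def Spec_clearGrid (grid : List String) (loop : List (Int × Int)) (out : List String) : Prop := out = clearGrid_alt grid loop
instance (grid : List String) (loop : List (Int × Int)) (out : List String) : Decidable (Spec_clearGrid grid loop out) := by unfold Spec_clearGrid; infer_instance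

-- ===== CLAIM (what is proved, stated in full; the proofs are below) =====
def Claim_equal_clearGrid : Prop := ∀ (grid : List String) (loop : List (Int × Int)), Dom_clearGrid grid loop → Spec_clearGrid grid loop (clearGrid grid loop)

-- ===== LEMMAS AND PROOFS =====

theorem getElem?_eq_some_getD {a : Type} (l : List a) (d : a) (i : Nat) (h : i < l.length) :
    l[i]? = some (l.getD i d) := by
  rw [List.getElem?_eq_getElem h, List.getD_eq_getElem _ _ h]

theorem getD_scatterStep (grid : List String) (cl : List (List Char)) (p : Int × Int) (i : Nat) :
    (scatterStep grid cl p).getD i [] =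
      if 0 ≤ p.1 ∧ p.1 < (cl.length : Int) ∧ 0 ≤ p.2 ∧ p.2 < ((cl.getD p.1.toNat []).length : Int)
          ∧ p.1.toNat = i
      then (cl.getD i []).set p.2.toNat ((grid.getD i "").toList.getD p.2.toNat '.')
      else cl.getD i [] := by
  unfold scatterStep
  by_cases hg : 0 ≤ p.1 ∧ p.1 < (cl.length : Int) ∧ 0 ≤ p.2 ∧ p.2 < ((cl.getD p.1.toNat []).length : Int)
  · rw [if_pos hg]
    by_cases hi : p.1.toNat = i
    · subst hi
      rw [if_pos ⟨hg.1, hg.2.1, hg.2.2.1, hg.2.2.2, rfl⟩]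
      have hlt : p.1.toNat < cl.length := by omega
      rw [List.getD_eq_getElem?_getD, List.getD_eq_getElem?_getD,
        List.getElem?_modify, List.getElem?_eq_getElem hlt]
      simp [List.getElem?_eq_getElem hlt]
    · rw [if_neg (by tauto)]
      rw [List.getD_eq_getElem?_getD, List.getD_eq_getElem?_getD, List.getElem?_modify]
      cases h : cl[i]? <;> simp [hi, h]
  · rw [if_neg hg, if_neg (by tauto)]

theorem length_scatterStep (grid : List String) (cl : List (List Char)) (p : Int × Int) :
    (scatterStep grid cl p).length = cl.length := by
  unfold scatterStep; split <;> simp [List.length_modify]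

theorem rowlen_scatterStep (grid : List String) (cl : List (List Char)) (p : Int × Int) (i : Nat) :
    ((scatterStep grid cl p).getD i []).length = (cl.getD i []).length := by
  rw [getD_scatterStep]; split <;> simp

-- cell (i, j) after one scatter step
theorem cell_scatterStep (grid : List String) (cl : List (List Char)) (p : Int × Int) (i j : Nat) :
    ((scatterStep grid cl p).getD i []).getD j '.' =
      if p = ((i : Int), (j : Int)) ∧ i < cl.length ∧ j < (cl.getD i []).length
      then (grid.getD i "").toList.getD j '.'
      else (cl.getD i []).getD j '.' := by
  rw [getD_scatterStep]
  by_cases hg : 0 ≤ p.1 ∧ p.1 < (cl.length : Int) ∧ 0 ≤ p.2 ∧ p.2 < ((cl.getD p.1.toNat []).length : Int) ∧ p.1.toNat = i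
  · rw [if_pos hg]
    obtain ⟨h1, h2, h3, h4, h5⟩ := hg
    have hicl : i < cl.length := by omega
    have hrow : p.2.toNat < (cl.getD i []).length := by
      have he : (cl.getD p.1.toNat []).length = (cl.getD i []).length := by rw [h5]
      omega
    by_cases hj : p.2.toNat = j
    · subst hj
      have hp : p = ((i : Int), ((p.2.toNat : Nat) : Int)) := by
        have : p.1 = (i : Int) := by omega
        have h2' : ((p.2.toNat : Nat) : Int) = p.2 := by omega
        cases p
        simp only [Prod.mk.injEq]
        exact ⟨this, h2'.symm⟩
      rw [if_pos ⟨hp, hicl, hrow⟩]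
      rw [List.getD_eq_getElem?_getD, List.getElem?_set, if_pos rfl, if_pos hrow]
      rfl
    · have hp : ¬ (p = ((i : Int), (j : Int))) := by
        intro h
        apply hj
        rw [h]
        simp
      rw [if_neg (by tauto)]
      rw [List.getD_eq_getElem?_getD, List.getElem?_set, if_neg hj,
        ← List.getD_eq_getElem?_getD]
  · rw [if_neg hg]
    by_cases hp : p = ((i : Int), (j : Int)) ∧ i < cl.length ∧ j < (cl.getD i []).length
    · exfalso
      obtain ⟨hpe, hicl, hjr⟩ := hp
      apply hg
      subst hpe
      refine ⟨?_, ?_, ?_, ?_, ?_⟩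
      · show (0 : Int) ≤ (i : Int)
        exact Int.natCast_nonneg i
      · show (i : Int) < (cl.length : Int)
        exact_mod_cast hicl
      · show (0 : Int) ≤ (j : Int)
        exact Int.natCast_nonneg j
      · show (j : Int) < ((cl.getD ((i : Int)).toNat []).length : Int)
        have hti : ((i : Int)).toNat = i := Int.toNat_natCast i
        rw [hti]
        exact_mod_cast hjr
      · exact Int.toNat_natCast i
    · rw [if_neg hp]

-- cell (i, j) after the whole scatter fold: the grid character if (i, j) occurred in the
-- processed loop list (and is in bounds), else the accumulator's value at (i, j)
theorem fold_cell (grid : List String) :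
    ∀ (l : List (Int × Int)) (cl : List (List Char)) (i j : Nat),
    ((l.foldl (scatterStep grid) cl).getD i []).getD j '.' =
      if ((i : Int), (j : Int)) ∈ l ∧ i < cl.length ∧ j < (cl.getD i []).length
      then (grid.getD i "").toList.getD j '.'
      else (cl.getD i []).getD j '.' := by
  intro l
  induction l with
  | nil => intro cl i j; simp
  | cons x l ih =>
    intro cl i j
    rw [List.foldl_cons, ih, length_scatterStep, rowlen_scatterStep, cell_scatterStep]
    by_cases hb : i < cl.length ∧ j < (cl.getD i []).length
    · by_cases hm : ((i : Int), (j : Int)) ∈ l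
      · rw [if_pos ⟨hm, hb⟩, if_pos ⟨List.mem_cons_of_mem _ hm, hb⟩]
      · rw [if_neg (by tauto)]
        by_cases hx : x = ((i : Int), (j : Int))
        · rw [if_pos ⟨hx, hb.1, hb.2⟩, if_pos ⟨by simp [hx], hb⟩]
        · rw [if_neg (by tauto), if_neg (by
            intro h
            rcases List.mem_cons.mp h.1 with h1 | h1
            · exact hx h1.symm
            · exact hm h1)]
    · rw [if_neg (by tauto), if_neg (by tauto), if_neg (by tauto)]

theorem fold_len (grid : List String) (l : List (Int × Int)) (cl : List (List Char)) :
    (l.foldl (scatterStep grid) cl).length = cl.length := by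
  induction l generalizing cl with
  | nil => rfl
  | cons x l ih => rw [List.foldl_cons, ih, length_scatterStep]

theorem fold_rowlen (grid : List String) (l : List (Int × Int)) (cl : List (List Char)) (i : Nat) :
    ((l.foldl (scatterStep grid) cl).getD i []).length = (cl.getD i []).length := by
  induction l generalizing cl with
  | nil => rfl
  | cons x l ih => rw [List.foldl_cons, ih, rowlen_scatterStep]

-- ===== VERDICT (by name: the statement is the Claim_ definition above) =====
theorem clearGrid_spec : Claim_equal_clearGrid := by
  intro grid loop _
  unfold Spec_clearGrid clearGrid clearGrid_alt
  simp only []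
  apply congrArg (List.map String.mk)
  set G := grid.map (fun row => row.toList) with hG
  set blank := grid.map (fun row => List.replicate row.toList.length '.') with hblank
  have hGlen : G.length = grid.length := by simp [hG]
  have hblen : blank.length = grid.length := by simp [hblank]
  have hflen : (loop.foldl (scatterStep grid) blank).length = grid.length := by
    rw [fold_len]; omega
  apply List.ext_getElem?
  intro i
  by_cases hi : i < grid.length
  · have hGi : G[i]? = some (grid.getD i "").toList := by
      rw [hG, List.getElem?_map, getElem?_eq_some_getD grid "" i hi]
      rfl
    have hbrow : blank.getD i [] = List.replicate (grid.getD i "").toList.length '.' := by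
      rw [hblank, List.getD_eq_getElem?_getD, List.getElem?_map,
        getElem?_eq_some_getD grid "" i hi]
      rfl
    have hrlen : ((loop.foldl (scatterStep grid) blank).getD i []).length
        = (grid.getD i "").toList.length := by
      rw [fold_rowlen, hbrow, List.length_replicate]
    rw [List.getElem?_map, PySem.List.getElem?_enumerate, hGi,
      getElem?_eq_some_getD (loop.foldl (scatterStep grid) blank) [] i (by omega)]
    simp only [Option.map_some]
    congr 1
    apply List.ext_getElem?
    intro j
    by_cases hj : j < (grid.getD i "").toList.length
    · rw [List.getElem?_map, PySem.List.getElem?_enumerate,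
        getElem?_eq_some_getD (grid.getD i "").toList '.' j hj,
        getElem?_eq_some_getD _ '.' j (by omega)]
      rw [fold_cell]
      have hbnd : i < blank.length ∧ j < (blank.getD i []).length := by
        refine ⟨by omega, ?_⟩
        rw [hbrow, List.length_replicate]
        exact hj
      simp only [Option.map_some, zero_add]
      by_cases hm : ((i : Int), (j : Int)) ∈ loop
      · have hnn : ¬ (((i : Int), (j : Int)) ∉ PySem.Set.ofList loop) := by
          simp [PySem.Set.mem_ofList, hm]
        rw [if_neg hnn, if_pos ⟨hm, hbnd⟩]
      · have hnn : (((i : Int), (j : Int)) ∉ PySem.Set.ofList loop) := by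
          simp [PySem.Set.mem_ofList, hm]
        rw [if_pos hnn, if_neg (by tauto), hbrow,
          List.getD_eq_getElem _ _ (by simpa using hj), List.getElem_replicate]
    · rw [List.getElem?_eq_none (by simpa using Nat.le_of_not_lt hj),
        List.getElem?_eq_none (by rw [hrlen]; omega)]
  · rw [List.getElem?_eq_none (by
        rw [List.length_map, PySem.List.length_enumerate]; omega),
      List.getElem?_eq_none (by rw [hflen]; omega)]
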